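-- pv_equiv track=rewrite | github.com/jezonek/pattern_recognition | pattern_recognition.py | find_lengths_spotted_in
-- ===== SOURCE A (Python) =====
-- def find_lengths_spotted_in(data):
--     """Finds out how long the strings in a dataset are.
--     :param data: whole dataset
--     :type str
--     :return: Dictionary in form {Length of string: Number of occurrences}
--     :rtype: dict
--     """
--     found_length_values = {}
--     for line in data.splitlines():
--         if len(line) not in found_length_values.keys():
--             found_length_values.update({len(line): 1})
--         else:
--             found_length_values[len(line)] += 1
--     return found_length_values
-- ===== SOURCE B (Python) =====
-- def find_lengths_spotted_in(data):
--     """Finds out how long the strings in a dataset are.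
--     :param data: whole dataset
--     :type str
--     :return: Dictionary in form {Length of string: Number of occurrences}
--     :rtype: dict
--     """
--     lens = [len(line) for line in data.splitlines()]
--     return {x: lens.count(x) for x in dict.fromkeys(lens)}
-- ===== Notes on version B (the rewrite author's own statement) =====
-- stated objective: alternative
-- what changed: Replaces the incremental hash-map accumulation (membership test + in-place increment per line) by a two-phase pass: collect all line lengths, deduplicate them in first-occurrence order, and count each distinct length with list.count.
import Mathlib
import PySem

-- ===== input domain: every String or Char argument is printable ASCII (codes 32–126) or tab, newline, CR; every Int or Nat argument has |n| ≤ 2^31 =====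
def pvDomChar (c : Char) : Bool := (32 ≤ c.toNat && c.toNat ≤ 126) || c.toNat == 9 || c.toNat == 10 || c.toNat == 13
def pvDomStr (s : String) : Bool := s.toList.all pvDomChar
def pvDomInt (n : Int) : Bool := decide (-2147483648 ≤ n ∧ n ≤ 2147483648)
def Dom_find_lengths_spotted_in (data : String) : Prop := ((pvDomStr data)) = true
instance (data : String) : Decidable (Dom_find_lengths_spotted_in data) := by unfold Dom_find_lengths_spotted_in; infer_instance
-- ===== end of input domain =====

-- B replaces A's incremental dict accumulation by dedup-in-first-occurrence-order + count-per-distinct-length; alternative decomposition, same results.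


-- ===== PORT A =====
def find_lengths_spotted_in (data : String) : List (Int × Int) :=
  ((PySem.Str.splitlines data).foldl
    (fun d line =>
      let k : Int := (PySem.Str.len line : Int)
      if ¬ (k ∈ d.keys) then d.insert k 1
      else d.insert k (d.getD k 0 + 1))
    PySem.Dict.empty).items

-- ===== PORT B =====
def find_lengths_spotted_in_alt (data : String) : List (Int × Int) :=
  let lens : List Int := (PySem.Str.splitlines data).map (fun line => (PySem.Str.len line : Int))
  (PySem.List.dedup lens).map (fun x => (x, (PySem.List.count lens x : Int)))

-- ===== PRECONDITION & SPEC =====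
def Spec_find_lengths_spotted_in (data : String) (out : List (Int × Int)) : Prop := out = find_lengths_spotted_in_alt data
instance (data : String) (out : List (Int × Int)) : Decidable (Spec_find_lengths_spotted_in data out) := by unfold Spec_find_lengths_spotted_in; infer_instance

-- ===== CLAIM (what is proved, stated in full; the proofs are below) =====
def Claim_equal_find_lengths_spotted_in : Prop := ∀ (data : String), Dom_find_lengths_spotted_in data → Spec_find_lengths_spotted_in data (find_lengths_spotted_in data)

-- ===== LEMMAS AND PROOFS =====

-- A's two branches both perform d.insert k (d.getD k 0 + 1): when k is absent, getD gives the default 0.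
theorem pv_branch_eq (d : PySem.Dict Int Int) (k : Int) :
    (if ¬ (k ∈ d.keys) then d.insert k 1 else d.insert k (d.getD k 0 + 1))
      = d.insert k (d.getD k 0 + 1) := by
  by_cases h : k ∈ d.keys
  · rw [if_neg (not_not_intro h)]
  · have hc : d.contains k = false := by
      cases hcc : d.contains k with
      | false => rfl
      | true => exact absurd ((PySem.Dict.contains_iff_mem_keys d k).mp hcc) h
    rw [if_pos h, PySem.Dict.getD_of_not_contains d 0 hc]
    norm_num

-- ===== VERDICT (by name: the statement is the Claim_ definition above) =====
theorem find_lengths_spotted_in_spec : Claim_equal_find_lengths_spotted_in := by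
  intro data _
  unfold Spec_find_lengths_spotted_in find_lengths_spotted_in find_lengths_spotted_in_alt
  simp only [pv_branch_eq]
  have h1 : List.foldl
      (fun (d : PySem.Dict Int Int) (line : String) =>
        d.insert ((PySem.Str.len line : Int)) (d.getD ((PySem.Str.len line : Int)) 0 + 1))
      PySem.Dict.empty (PySem.Str.splitlines data)
      = PySem.Dict.counter ((PySem.Str.splitlines data).map (fun line => ((PySem.Str.len line : Int)))) := by
    rw [← PySem.Dict.foldl_insert_getD_add_one_eq_counter, List.foldl_map]
  rw [h1, PySem.Dict.items_counter, PySem.List.dedup_eq_ofList]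
  simp [PySem.List.count_eq]
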